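-- pv_equiv track=rewrite | github.com/itactuk/estructura2021ene | codigo_python_estruct/clase02_intro_python/digitos_consecutivos.py | contar_digitos_consecutivos
-- ===== SOURCE A (Python) =====
-- def contar_digitos_consecutivos(texto: str) -> int:  # -> indica valor de retorno. En este caso, int
--     """
--     "34342jjkl43jj43kjl43"
--     "fsdfsd3535fdsfsd"
--     "fdsfsd434"
--     :param texto:
--     :return:
--     """
--     contador = 0
--     # for i in range(len(texto))
--     # c = texto[i]
--     # for i in range(0, len(texto))
--     # for c in texto:
--     for i in range(len(texto)):
--         c = texto[i]
--         c_a = None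
--         c_s = None
--         if i > 0:
--             c_a = texto[i-1]
--         if i < len(texto) - 1:  # "hola"   -> len(texto)=4   text[0]=h, texto[1]="o", texto[2]=l, texto[3]=o
--             c_s = texto[i+1]
--         if c.isdigit():
--             es_consecutivo = False
--             if c_a is not None and c_a.isdigit():
--                 es_consecutivo = True
--             if c_s is not None and c_s.isdigit():
--                 es_consecutivo = True
--             if es_consecutivo:
--                 contador += 1
--     return contador
-- ===== SOURCE B (Python) =====
-- from itertools import groupby
--
--
-- def contar_digitos_consecutivos(texto: str) -> int:
--     contador = 0
--     for es_digito, grupo in groupby(texto, key=str.isdigit):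
--         if es_digito:
--             n = len(list(grupo))
--             if n >= 2:
--                 contador += n
--     return contador
-- ===== Notes on version B (the rewrite author's own statement) =====
-- stated objective: simpler
-- what changed: Replaces per-character neighbour inspection (indexing i-1/i+1 with None sentinels) by run-length grouping: split the string into maximal digit runs with itertools.groupby and add each run's length when it is at least 2.
import Mathlib
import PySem

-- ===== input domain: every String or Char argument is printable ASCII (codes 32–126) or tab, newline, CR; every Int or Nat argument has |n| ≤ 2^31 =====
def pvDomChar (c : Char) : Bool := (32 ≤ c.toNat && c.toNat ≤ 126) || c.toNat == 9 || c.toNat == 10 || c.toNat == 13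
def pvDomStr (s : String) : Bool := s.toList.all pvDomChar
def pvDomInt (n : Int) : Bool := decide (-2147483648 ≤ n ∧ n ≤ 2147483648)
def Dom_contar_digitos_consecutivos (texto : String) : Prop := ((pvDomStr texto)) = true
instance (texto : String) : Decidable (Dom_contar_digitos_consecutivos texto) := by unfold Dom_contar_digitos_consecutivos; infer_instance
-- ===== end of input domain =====

-- B replaces A's per-index neighbour inspection by run-length grouping over maximal digit runs (simpler decomposition, same cost).
set_option maxHeartbeats 1000000


-- ===== PORT A =====
-- for i in range(len(texto)): look at texto[i], texto[i-1] (if i>0), texto[i+1] (if i<len-1)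
def contar_digitos_consecutivos (texto : String) : Int :=
  (PySem.List.pyRange 0 (PySem.Str.len texto) 1).foldl
    (fun contador i =>
      match PySem.Str.pyGet? texto i with
      | none => contador   -- unreachable: i ∈ range(len)
      | some c =>
        let c_a : Option Char := if 0 < i then PySem.Str.pyGet? texto (i - 1) else none
        let c_s : Option Char := if i < PySem.Str.len texto - 1 then PySem.Str.pyGet? texto (i + 1) else none
        if PySem.Chars.isdigit c then
          let es_consecutivo : Bool :=
            (match c_a with | some a => PySem.Chars.isdigit a | none => false) ||
            (match c_s with | some s => PySem.Chars.isdigit s | none => false)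
          if es_consecutivo then contador + 1 else contador
        else contador) 0

-- ===== PORT B =====
-- groupby(texto, key=str.isdigit): consume each maximal digit run at once; add its length when ≥ 2
def pvAltGo : List Char → Int
  | [] => 0
  | c :: rest =>
    if PySem.Chars.isdigit c then
      let n := 1 + (rest.takeWhile PySem.Chars.isdigit).length
      (if 2 ≤ n then (n : Int) else 0) + pvAltGo (rest.dropWhile PySem.Chars.isdigit)
    else
      pvAltGo rest
termination_by l => l.length
decreasing_by
  · exact Nat.lt_succ_of_le (List.length_dropWhile_le _ _)
  · simp

def contar_digitos_consecutivos_alt (texto : String) : Int := pvAltGo texto.toList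

-- ===== PRECONDITION & SPEC =====
def Spec_contar_digitos_consecutivos (texto : String) (out : Int) : Prop := out = contar_digitos_consecutivos_alt texto
instance (texto : String) (out : Int) : Decidable (Spec_contar_digitos_consecutivos texto out) := by unfold Spec_contar_digitos_consecutivos; infer_instance

-- ===== CLAIM (what is proved, stated in full; the proofs are below) =====
def Claim_equal_contar_digitos_consecutivos : Prop := ∀ (texto : String), Dom_contar_digitos_consecutivos texto → Spec_contar_digitos_consecutivos texto (contar_digitos_consecutivos texto)

-- ===== LEMMAS AND PROOFS =====

-- head-is-a-digit test (gCount's "next char" disjunct)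
def pvHeadDig (l : List Char) : Bool :=
  match l.head? with
  | some d => PySem.Chars.isdigit d
  | none => false

-- common recursive characterisation: count with a "previous char was a digit" flag
def pvG : Bool → List Char → Int
  | _, [] => 0
  | prev, c :: rest =>
    (if PySem.Chars.isdigit c && (prev || pvHeadDig rest) then (1 : Int) else 0)
      + pvG (PySem.Chars.isdigit c) rest

-- A's per-index indicator, over Nat indices
def pvInd (l : List Char) (k : Nat) : Int :=
  if PySem.Chars.isdigit (l.getD k ' ') &&
      ((decide (0 < k) && PySem.Chars.isdigit (l.getD (k - 1) ' ')) ||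
       (decide (k + 1 < l.length) && PySem.Chars.isdigit (l.getD (k + 1) ' ')))
  then 1 else 0

-- index-shifted indicator with an explicit previous-flag (for the induction)
def pvIndP (prev : Bool) (l : List Char) (k : Nat) : Int :=
  if PySem.Chars.isdigit (l.getD k ' ') &&
      ((if k = 0 then prev else PySem.Chars.isdigit (l.getD (k - 1) ' ')) ||
       (decide (k + 1 < l.length) && PySem.Chars.isdigit (l.getD (k + 1) ' ')))
  then 1 else 0

lemma pvInd_eq_pvIndP (l : List Char) (k : Nat) : pvInd l k = pvIndP false l k := by
  unfold pvInd pvIndP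
  rcases Nat.eq_zero_or_pos k with h | h
  · simp [h]
  · simp [h, Nat.pos_iff_ne_zero.mp h]

lemma pvIndP_succ (prev : Bool) (c : Char) (rest : List Char) (k : Nat) :
    pvIndP prev (c :: rest) (k + 1) = pvIndP (PySem.Chars.isdigit c) rest k := by
  unfold pvIndP
  rcases k with _ | k'
  · simp only [Nat.zero_add, List.getD_cons_succ, List.length_cons,
      Nat.add_lt_add_iff_right, if_neg (Nat.one_ne_zero)]
    norm_num
  · simp only [List.getD_cons_succ, List.length_cons, Nat.add_sub_cancel,
      Nat.add_lt_add_iff_right, if_neg (Nat.succ_ne_zero _)]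

lemma pvIndP_zero (prev : Bool) (c : Char) (rest : List Char) :
    pvIndP prev (c :: rest) 0
      = (if PySem.Chars.isdigit c && (prev || pvHeadDig rest) then (1 : Int) else 0) := by
  unfold pvIndP pvHeadDig
  cases rest with
  | nil => simp
  | cons d t =>
    simp only [List.length_cons, List.getD]
    split_ifs <;> simp_all

-- the indexed sum equals the recursive characterisation
lemma pvSum_eq_pvG (l : List Char) (prev : Bool) :
    ((List.range l.length).map (pvIndP prev l)).sum = pvG prev l := by
  induction l generalizing prev with
  | nil => simp [pvG]
  | cons c rest ih =>
    have : (List.range (c :: rest).length) = 0 :: (List.range rest.length).map Nat.succ := by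
      simp [List.range_succ_eq_map]
    rw [this]
    simp only [List.map_cons, List.map_map, List.sum_cons]
    have hmap : ((List.range rest.length).map (pvIndP prev (c :: rest) ∘ Nat.succ))
        = (List.range rest.length).map (pvIndP (PySem.Chars.isdigit c) rest) := by
      apply List.map_congr_left
      intro k _
      simpa using pvIndP_succ prev c rest k
    rw [hmap, ih, pvIndP_zero, pvG]

-- A equals the indexed sum
lemma pvA_eq_sum (texto : String) :
    contar_digitos_consecutivos texto
      = ((List.range texto.toList.length).map (pvInd texto.toList)).sum := by
  unfold contar_digitos_consecutivos
  rw [PySem.Str.len_eq, PySem.List.pyRange_one]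
  simp only [Int.sub_zero, Int.toNat_natCast, List.foldl_map, Int.zero_add]
  rw [PySem.List.foldl_congr_mem _ _ (fun a (k : Nat) => a + pvInd texto.toList k) 0 ?_]
  · rw [PySem.List.foldl_add]; simp
  · intro a k hk
    rw [List.mem_range] at hk
    have hget : PySem.Str.pyGet? texto ((k : Int)) = some texto.toList[k] := by
      simp only [PySem.Str.pyGet?, PySem.Chars.pyGet?_eq_listPyGet?, PySem.List.pyGet?_natCast]
      exact List.getElem?_eq_getElem hk
    rw [hget]
    have hca : (if (0:ℤ) < (k:ℤ) then PySem.Str.pyGet? texto ((k:ℤ) - 1) else none)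
        = if 0 < k then some (texto.toList.getD (k-1) ' ') else none := by
      rcases Nat.eq_zero_or_pos k with h0 | h0
      · subst h0; simp
      · rw [if_pos (by exact_mod_cast h0), if_pos h0,
          List.getD_eq_getElem _ ' ' (show k-1 < texto.toList.length by omega)]
        have he : ((k:ℤ) - 1) = ((k-1 : Nat) : ℤ) := by omega
        rw [he]
        simp only [PySem.Str.pyGet?, PySem.Chars.pyGet?_eq_listPyGet?, PySem.List.pyGet?_natCast]
        exact List.getElem?_eq_getElem _
    have hcs : (if (k:ℤ) < (texto.toList.length : ℤ) - 1 then PySem.Str.pyGet? texto ((k:ℤ) + 1) else none)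
        = if k + 1 < texto.toList.length then some (texto.toList.getD (k+1) ' ') else none := by
      by_cases h1 : k + 1 < texto.toList.length
      · rw [if_pos (by push_cast; omega), if_pos h1,
          List.getD_eq_getElem _ ' ' h1]
        have he : ((k:ℤ) + 1) = ((k+1 : Nat) : ℤ) := by omega
        rw [he]
        simp only [PySem.Str.pyGet?, PySem.Chars.pyGet?_eq_listPyGet?, PySem.List.pyGet?_natCast]
        exact List.getElem?_eq_getElem h1
      · rw [if_neg (by exact_mod_cast (by omega : ¬ ((k:Int) < (texto.toList.length:Int) - 1))), if_neg h1]
    rw [hca, hcs]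
    have e0 : texto.toList[k]?.getD ' ' = texto.toList[k] := by
      rw [List.getElem?_eq_getElem hk]; rfl
    have e1 : texto.toList[k-1]?.getD ' ' = texto.toList[k-1] := by
      rw [List.getElem?_eq_getElem (show k-1 < texto.toList.length by omega)]; rfl
    by_cases h1 : k + 1 < texto.toList.length
    · have e2 : texto.toList[k+1]?.getD ' ' = texto.toList[k+1] := by
        rw [List.getElem?_eq_getElem h1]; rfl
      by_cases h0 : 0 < k <;> simp [pvInd, h0, h1] <;>
        split_ifs <;> simp_all [String.length_toList, e0, e1, e2] <;> omega
    · by_cases h0 : 0 < k <;> simp [pvInd, h0, h1] <;>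
        split_ifs <;> simp_all [String.length_toList, e0, e1] <;> omega


-- === B side ===

lemma pvG_prev_irrel (p q : Bool) (l : List Char) (h : pvHeadDig l = false) :
    pvG p l = pvG q l := by
  cases l with
  | nil => rfl
  | cons c rest =>
    unfold pvHeadDig at h
    simp at h
    simp [pvG, h]

lemma pvG_run (ds rest : List Char) (hne : ds ≠ [])
    (hds : ∀ d ∈ ds, PySem.Chars.isdigit d = true)
    (hr : pvHeadDig rest = false) :
    pvG true (ds ++ rest) = (ds.length : Int) + pvG false rest := by
  induction ds with
  | nil => exact absurd rfl hne
  | cons d t ih =>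
    have hd : PySem.Chars.isdigit d = true := hds d (by simp)
    cases t with
    | nil =>
      simp [pvG, hd, pvG_prev_irrel true false rest hr]
    | cons d2 t2 =>
      have hd2 : PySem.Chars.isdigit d2 = true := hds d2 (by simp)
      have ihx := ih (by simp) (fun x hx => hds x (List.mem_cons_of_mem _ hx))
      simp only [List.cons_append] at ihx ⊢
      have hhead : pvHeadDig (d2 :: (t2 ++ rest)) = true := by simp [pvHeadDig, hd2]
      rw [pvG, hd, hhead]
      rw [ihx]
      simp
      ring

lemma pvHeadDig_dropWhile (l : List Char) :
    pvHeadDig (l.dropWhile PySem.Chars.isdigit) = false := by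
  induction l with
  | nil => rfl
  | cons c rest ih =>
    by_cases h : PySem.Chars.isdigit c
    · simpa [h] using ih
    · simp at h; simp [List.dropWhile_cons, h, pvHeadDig]

lemma pvAltGo_eq_pvG (l : List Char) : pvAltGo l = pvG false l := by
  induction l using pvAltGo.induct with
  | case1 => rw [pvAltGo]; rfl
  | case2 c rest hd ih =>
    cases rest with
    | nil => rw [pvAltGo]; simp [hd, pvG, pvHeadDig]; rw [pvAltGo]
    | cons d t =>
      by_cases hdd : PySem.Chars.isdigit d = true
      · have hne : (d :: t).takeWhile PySem.Chars.isdigit ≠ [] := by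
          simp [List.takeWhile_cons_of_pos, hdd]
        have hrun := pvG_run ((d :: t).takeWhile PySem.Chars.isdigit)
          ((d :: t).dropWhile PySem.Chars.isdigit) hne
          (fun x hx => List.mem_takeWhile_imp hx) (pvHeadDig_dropWhile (d :: t))
        rw [List.takeWhile_append_dropWhile] at hrun
        have hhd : pvHeadDig (d :: t) = true := by simp [pvHeadDig, hdd]
        have htk : 1 ≤ ((d :: t).takeWhile PySem.Chars.isdigit).length := by
          rw [List.takeWhile_cons_of_pos hdd]; simp
        rw [pvAltGo]
        simp only [hd, if_pos, ih]
        rw [pvG, hd, hhd]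
        simp only [Bool.true_and, Bool.or_true]
        rw [hrun, if_pos (by omega)]
        push_cast
        ring
      · have hrest : (d :: t).takeWhile PySem.Chars.isdigit = [] :=
          List.takeWhile_cons_of_neg hdd
        have hdrop : (d :: t).dropWhile PySem.Chars.isdigit = d :: t :=
          List.dropWhile_cons_of_neg hdd
        have hhd : pvHeadDig (d :: t) = false := by
          simp only [Bool.not_eq_true] at hdd; simp [pvHeadDig, hdd]
        rw [hdrop] at ih
        rw [pvAltGo]
        simp only [hd, if_pos, hrest, hdrop, List.length_nil]
        rw [pvG, hd, hhd]
        simp only [Bool.false_or]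
        simp [ih, pvG_prev_irrel true false (d :: t) hhd]
  | case3 c rest hd ih =>
    rw [pvAltGo, pvG]
    simp only [Bool.not_eq_true] at hd
    simp [hd, ih]


-- ===== VERDICT (by name: the statement is the Claim_ definition above) =====
theorem contar_digitos_consecutivos_spec : Claim_equal_contar_digitos_consecutivos := by
  intro texto _
  unfold Spec_contar_digitos_consecutivos contar_digitos_consecutivos_alt
  rw [pvA_eq_sum, pvAltGo_eq_pvG, ← pvSum_eq_pvG]
  congr 1
  exact List.map_congr_left fun k _ => pvInd_eq_pvIndP _ k
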